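-- pv_equiv track=rewrite | github.com/SebastienVanlede/CCSA-Python | 5. Lijsten en Tuples/snake.py | laatste_levende_positie
-- ===== SOURCE A (Python) =====
-- def beweeg(coordinates, richting):
--     if richting == '^':
--         return coordinates[0], coordinates[1] + 1
--     if richting == 'v':
--         return coordinates[0], coordinates[1] - 1
--     if richting == '>':
--         return coordinates[0] + 1, coordinates[1]
--     if richting == '<':
--         return coordinates[0] - 1, coordinates[1]
--
-- def teruggekeerd(richting):
--     if richting[1] == '>' and richting[0] == '<' or richting[0] == '>' and richting[1] == '<':
--         return True
--     if richting[1] == 'v' and richting[0] == '^' or richting[0] == 'v' and richting[1] == '^':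
--         return True
--     return False
--
-- def laatste_levende_positie(richting):
--     coordinates = [0, 0]
--     valid = 0
--     vorige = None
--
--     for i in richting:
--         if vorige is None:
--             coordinates = beweeg(coordinates, i)
--             vorige = i
--             valid += 1
--         else:
--             if teruggekeerd([vorige, i]):
--                 return valid, coordinates[0], coordinates[1]
--             coordinates = beweeg(coordinates, i)
--             vorige = i
--             valid += 1
--     return valid, coordinates[0], coordinates[1]
-- ===== SOURCE B (Python) =====
-- def laatste_levende_positie(richting):
--     # pass 1: find the stop point (first index whose char reverses the previous one)
--     opp = {'<': '>', '>': '<', '^': 'v', 'v': '^'}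
--     cut = len(richting)
--     for i in range(1, len(richting)):
--         if opp.get(richting[i - 1]) == richting[i]:
--             cut = i
--             break
--     # pass 2: aggregate the per-step displacements over the surviving prefix
--     deltas = {'>': (1, 0), '<': (-1, 0), '^': (0, 1), 'v': (0, -1)}
--     x = y = 0
--     for c in richting[:cut]:
--         d = deltas.get(c)  # None for an unknown char -> d[0] raises TypeError, as A does
--         x += d[0]
--         y += d[1]
--     return cut, x, y
-- ===== Notes on version B (the rewrite author's own statement) =====
-- stated objective: alternative
-- what changed: Replaces A's single interleaved move-and-check loop carrying (coordinates, valid, vorige) state by two independent passes: a scan that finds the first reversal index (the cut), then per-axis delta sums over the surviving prefix.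
import Mathlib
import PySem

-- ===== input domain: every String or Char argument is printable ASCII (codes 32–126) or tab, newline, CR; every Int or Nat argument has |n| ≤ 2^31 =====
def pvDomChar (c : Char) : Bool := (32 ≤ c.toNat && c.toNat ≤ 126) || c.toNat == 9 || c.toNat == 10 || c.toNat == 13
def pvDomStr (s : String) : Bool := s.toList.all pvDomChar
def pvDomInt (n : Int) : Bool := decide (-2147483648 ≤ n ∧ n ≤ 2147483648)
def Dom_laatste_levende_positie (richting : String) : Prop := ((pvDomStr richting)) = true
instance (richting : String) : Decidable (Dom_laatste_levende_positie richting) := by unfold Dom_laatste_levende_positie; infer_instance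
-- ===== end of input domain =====

-- B replaces A's single interleaved move-and-check loop by two passes: find the first
-- reversal index (the cut), then sum per-axis deltas over the surviving prefix (alternative
-- decomposition, same O(n) cost).


-- ===== PORT A =====
-- beweeg: returns none for a char that is not one of the four direction characters (Python returns None there)
def beweeg (c : Int × Int) (r : Char) : Option (Int × Int) :=
  if r == '^' then some (c.1, c.2 + 1)
  else if r == 'v' then some (c.1, c.2 - 1)
  else if r == '>' then some (c.1 + 1, c.2)
  else if r == '<' then some (c.1 - 1, c.2)
  else none

def teruggekeerd (v i : Char) : Bool :=
  ((i == '>' && v == '<') || (v == '>' && i == '<')) ||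
  ((i == 'v' && v == '^') || (v == 'v' && i == '^'))

-- 'return valid, coordinates[0], coordinates[1]'; coordinates = none is where Python raises
-- TypeError (None[0]) — those inputs are excluded by Pre_, the port returns (valid, 0, 0) there.
def laReturn (coords : Option (Int × Int)) (valid : Int) : Int × Int × Int :=
  match coords with
  | some c => (valid, c.1, c.2)
  | none => (valid, 0, 0)

-- the for-loop of A, state (coordinates, valid, vorige); coords.bind beweeg models that
-- beweeg(None, i) would raise in Python (coords stays none; outside Pre_).
def laLoop (coords : Option (Int × Int)) (valid : Int) (vorige : Option Char) :
    List Char → Int × Int × Int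
  | [] => laReturn coords valid
  | i :: rest =>
    match vorige with
    | none => laLoop (coords.bind (fun c => beweeg c i)) (valid + 1) (some i) rest
    | some v =>
      if teruggekeerd v i then laReturn coords valid
      else laLoop (coords.bind (fun c => beweeg c i)) (valid + 1) (some i) rest

def laatste_levende_positie (richting : String) : Int × Int × Int :=
  laLoop (some (0, 0)) 0 none richting.toList

-- ===== PORT B =====
def oppD : PySem.Dict Char Char :=
  PySem.Dict.ofList [('<', '>'), ('>', '<'), ('^', 'v'), ('v', '^')]

-- for i in range(1, len(richting)): if opp.get(richting[i-1]) == richting[i]: cut = i; break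
-- (indices i-1, i are always in range here, so richting[·] is List.getD)
def cutLoopB (L : List Char) (i : Nat) : Nat :=
  if i < L.length then
    if oppD.get? (L.getD (i - 1) ' ') == some (L.getD i ' ') then i
    else cutLoopB L (i + 1)
  else L.length
termination_by L.length - i

-- deltas.get(c): none for an unknown char (where Python's d[0] raises TypeError)
def deltaB (c : Char) : Option (Int × Int) :=
  (PySem.Dict.ofList [('>', ((1 : Int), (0 : Int))), ('<', (-1, 0)),
                      ('^', (0, 1)), ('v', (0, -1))]).get? c

-- for c in richting[:cut]: accumulate x, y; on deltaB c = none Python raises TypeError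
-- (those inputs are outside Pre_), the port returns (0, 0) there.
def sumLoopB (x y : Int) : List Char → Int × Int
  | [] => (x, y)
  | c :: r =>
    match deltaB c with
    | some d => sumLoopB (x + d.1) (y + d.2) r
    | none => (0, 0)

def laatste_levende_positie_alt (richting : String) : Int × Int × Int :=
  let L := richting.toList
  let cut := cutLoopB L 1
  let pref := L.take cut          -- richting[:cut]
  let s := sumLoopB 0 0 pref
  ((cut : Int), s.1, s.2)

-- ===== PRECONDITION & SPEC =====
def oppP (a b : Char) : Bool :=
  (a == '<' && b == '>') || (a == '>' && b == '<') ||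
  (a == '^' && b == 'v') || (a == 'v' && b == '^')

-- Pre_ holds exactly when every character the snake actually processes (those not strictly
-- preceded by a reversal pair) is one of the four direction characters; on the other inputs
-- Python A raises TypeError (beweeg returns None and None is indexed).
def Pre_laatste_levende_positie (richting : String) : Prop :=
  ∀ i, i < richting.toList.length →
    (∀ j, j < i + 1 → 1 ≤ j →
      oppP (richting.toList.getD (j - 1) ' ') (richting.toList.getD j ' ') = false) →
    richting.toList.getD i ' ' ∈ (['^', 'v', '<', '>'] : List Char)

instance (richting : String) : Decidable (Pre_laatste_levende_positie richting) := by
  unfold Pre_laatste_levende_positie; infer_instance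

def pvWitness_laatste_levende_positie : String := ">>^v<"

def Spec_laatste_levende_positie (richting : String) (out : Int × Int × Int) : Prop := out = laatste_levende_positie_alt richting
instance (richting : String) (out : Int × Int × Int) : Decidable (Spec_laatste_levende_positie richting out) := by unfold Spec_laatste_levende_positie; infer_instance

-- ===== CLAIM (what is proved, stated in full; the proofs are below) =====
def Claim_equal_laatste_levende_positie : Prop := ∀ (richting : String), Dom_laatste_levende_positie richting → Pre_laatste_levende_positie richting → Spec_laatste_levende_positie richting (laatste_levende_positie richting)

-- ===== LEMMAS AND PROOFS =====

-- proof-side: length of the prefix processed after a first char p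
def pcut : Char → List Char → Nat
  | _, [] => 0
  | p, c :: r => if teruggekeerd p c then 0 else pcut c r + 1

-- proof-side: every processed char (until the first reversal) is a direction char
def okRun : Char → List Char → Prop
  | _, [] => True
  | p, c :: r => teruggekeerd p c = true ∨
      (c ∈ (['^', 'v', '<', '>'] : List Char) ∧ okRun c r)

-- proof-side per-axis displacements (the components of deltaB on direction chars)
def dxB (c : Char) : Int := (PySem.Dict.ofList [('>', (1 : Int)), ('<', -1)]).getD c 0
def dyB (c : Char) : Int := (PySem.Dict.ofList [('^', (1 : Int)), ('v', -1)]).getD c 0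

lemma opp_eq (p c : Char) : (oppD.get? p == some c) = teruggekeerd p c := by
  by_cases h1 : p = '<'
  · subst h1; rw [show oppD.get? '<' = some '>' from by decide]
    simp [teruggekeerd, Bool.beq_comm]
  by_cases h2 : p = '>'
  · subst h2; rw [show oppD.get? '>' = some '<' from by decide]
    simp [teruggekeerd, Bool.beq_comm]
  by_cases h3 : p = '^'
  · subst h3; rw [show oppD.get? '^' = some 'v' from by decide]
    simp [teruggekeerd, Bool.beq_comm]
  by_cases h4 : p = 'v'
  · subst h4; rw [show oppD.get? 'v' = some '^' from by decide]
    simp [teruggekeerd, Bool.beq_comm]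
  · have e1 : (('<' : Char) == p) = false := beq_eq_false_iff_ne.mpr (fun hh => h1 hh.symm)
    have e2 : (('>' : Char) == p) = false := beq_eq_false_iff_ne.mpr (fun hh => h2 hh.symm)
    have e3 : (('^' : Char) == p) = false := beq_eq_false_iff_ne.mpr (fun hh => h3 hh.symm)
    have e4 : (('v' : Char) == p) = false := beq_eq_false_iff_ne.mpr (fun hh => h4 hh.symm)
    rw [show oppD = PySem.Dict.mk [('<', '>'), ('>', '<'), ('^', 'v'), ('v', '^')] from by decide]
    simp [PySem.Dict.get?, e1, e2, e3, e4, teruggekeerd, h1, h2, h3, h4]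

lemma oppP_eq (p c : Char) : oppP p c = teruggekeerd p c := by
  simp [oppP, teruggekeerd, Bool.and_comm, Bool.or_comm, Bool.or_left_comm]

lemma beweeg_valid (x y : Int) (c : Char)
    (h : c ∈ (['^', 'v', '<', '>'] : List Char)) :
    beweeg (x, y) c = some (x + dxB c, y + dyB c) := by
  fin_cases h <;>
    simp [beweeg, show dxB '^' = 0 from by decide, show dyB '^' = 1 from by decide,
      show dxB 'v' = 0 from by decide, show dyB 'v' = -1 from by decide,
      show dxB '>' = 1 from by decide, show dyB '>' = 0 from by decide,
      show dxB '<' = -1 from by decide, show dyB '<' = 0 from by decide] <;> ring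

lemma laLoop_eq (rest : List Char) : ∀ (p : Char) (x y valid : Int), okRun p rest →
    laLoop (some (x, y)) valid (some p) rest =
      (valid + (pcut p rest : Int),
       x + ((rest.take (pcut p rest)).map dxB).sum,
       y + ((rest.take (pcut p rest)).map dyB).sum) := by
  induction rest with
  | nil => intro p x y valid _; simp [laLoop, laReturn, pcut]
  | cons c r ih =>
    intro p x y valid hok
    by_cases h : teruggekeerd p c
    · simp [laLoop, h, laReturn, pcut]
    · rcases hok with hv | ⟨hc, hr⟩
      · exact absurd hv h
      · simp only [laLoop, h, Option.bind_some, beweeg_valid x y c hc,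
          pcut, ih c _ _ _ hr]
        simp only [Bool.false_eq_true, if_false, List.take_succ_cons, List.map_cons,
          List.sum_cons, Prod.mk.injEq]
        push_cast
        refine ⟨by ring, by ring, by ring⟩

lemma cutLoopB_eq (L : List Char) : ∀ (n i : Nat), L.length - i = n → 1 ≤ i → i ≤ L.length →
    cutLoopB L i = i + pcut (L.getD (i - 1) ' ') (L.drop i) := by
  intro n
  induction n with
  | zero =>
    intro i hn h1 h2
    have hi : i = L.length := by omega
    rw [cutLoopB]
    simp [hi, pcut, List.drop_length]
  | succ m ih =>
    intro i hn h1 h2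
    have hlt : i < L.length := by omega
    have hdrop : L.drop i = L[i] :: L.drop (i + 1) := List.drop_eq_getElem_cons hlt
    have hgd : L.getD i ' ' = L[i] := List.getD_eq_getElem L ' ' hlt
    rw [cutLoopB]
    simp only [hlt, if_true, opp_eq]
    by_cases h : teruggekeerd (L.getD (i - 1) ' ') (L.getD i ' ')
    · rw [if_pos h, hdrop, pcut, if_pos (by rwa [← hgd])]
      omega
    · rw [if_neg h, ih (i + 1) (by omega) (by omega) (by omega), hdrop, pcut,
        if_neg (by rwa [← hgd])]
      simp only [Nat.add_sub_cancel, hgd]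
      omega

lemma pre_shift (c d : Char) (r : List Char)
    (h : ∀ i, i < (c :: d :: r).length →
      (∀ j, j < i + 1 → 1 ≤ j →
        oppP ((c :: d :: r).getD (j - 1) ' ') ((c :: d :: r).getD j ' ') = false) →
      (c :: d :: r).getD i ' ' ∈ (['^', 'v', '<', '>'] : List Char))
    (hno : oppP c d = false) :
    ∀ i, i < (d :: r).length →
      (∀ j, j < i + 1 → 1 ≤ j →
        oppP ((d :: r).getD (j - 1) ' ') ((d :: r).getD j ' ') = false) →
      (d :: r).getD i ' ' ∈ (['^', 'v', '<', '>'] : List Char) := by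
  intro i hi hg
  have := h (i + 1) (by simpa using Nat.succ_lt_succ hi) ?_
  · simpa using this
  · intro j hj h1
    obtain ⟨k, rfl⟩ : ∃ k, j = k + 1 := ⟨j - 1, by omega⟩
    cases k with
    | zero => simpa using hno
    | succ k' =>
      have hk := hg (k' + 1) (by omega) (by omega)
      simpa [List.getD_cons_succ] using hk

lemma pre_okRun : ∀ (r : List Char) (c : Char),
    (∀ i, i < (c :: r).length →
      (∀ j, j < i + 1 → 1 ≤ j →
        oppP ((c :: r).getD (j - 1) ' ') ((c :: r).getD j ' ') = false) →
      (c :: r).getD i ' ' ∈ (['^', 'v', '<', '>'] : List Char)) →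
    okRun c r := by
  intro r
  induction r with
  | nil => intro c _; trivial
  | cons d r' ih =>
    intro c h
    by_cases hcd : teruggekeerd c d
    · exact Or.inl hcd
    · have hno : oppP c d = false := by rw [oppP_eq]; exact Bool.eq_false_iff.mpr hcd
      have h' := pre_shift c d r' h hno
      refine Or.inr ⟨?_, ih d h'⟩
      have := h' 0 (by simp) (by omega)
      simpa using this

lemma pre_head (c : Char) (r : List Char)
    (h : ∀ i, i < (c :: r).length →
      (∀ j, j < i + 1 → 1 ≤ j →
        oppP ((c :: r).getD (j - 1) ' ') ((c :: r).getD j ' ') = false) →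
      (c :: r).getD i ' ' ∈ (['^', 'v', '<', '>'] : List Char)) :
    c ∈ (['^', 'v', '<', '>'] : List Char) := by
  have := h 0 (by simp) (by omega)
  simpa using this

lemma okRun_take_valid : ∀ (l : List Char) (p : Char), okRun p l →
    ∀ c ∈ l.take (pcut p l), c ∈ (['^', 'v', '<', '>'] : List Char) := by
  intro l
  induction l with
  | nil => intro p _ c hc; simp at hc
  | cons d r ih =>
    intro p hok c hc
    by_cases h : teruggekeerd p d
    · simp [pcut, h] at hc
    · rcases hok with hv | ⟨hd, hr⟩
      · exact absurd hv h
      · rw [pcut, if_neg h, List.take_succ_cons] at hc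
        rcases List.mem_cons.mp hc with rfl | hc'
        · exact hd
        · exact ih d hr c hc'

lemma deltaB_valid (c : Char) (h : c ∈ (['^', 'v', '<', '>'] : List Char)) :
    deltaB c = some (dxB c, dyB c) := by
  fin_cases h <;> decide

lemma sumLoopB_eq : ∀ (l : List Char) (x y : Int),
    (∀ c ∈ l, c ∈ (['^', 'v', '<', '>'] : List Char)) →
    sumLoopB x y l = (x + (l.map dxB).sum, y + (l.map dyB).sum) := by
  intro l
  induction l with
  | nil => intro x y _; simp [sumLoopB]
  | cons c r ih =>
    intro x y hv
    rw [sumLoopB, deltaB_valid c (hv c (List.mem_cons_self))]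
    show sumLoopB (x + dxB c) (y + dyB c) r = _
    rw [ih _ _ (fun d hd => hv d (List.mem_cons_of_mem c hd))]
    simp only [List.map_cons, List.sum_cons, Prod.mk.injEq]
    constructor <;> ring

-- ===== VERDICT (by name: the statement is the Claim_ definition above) =====
theorem laatste_levende_positie_spec : Claim_equal_laatste_levende_positie := by
  intro richting _ hpre
  unfold Spec_laatste_levende_positie laatste_levende_positie laatste_levende_positie_alt
  unfold Pre_laatste_levende_positie at hpre
  rcases hL : richting.toList with _ | ⟨c, r⟩
  · simp [laLoop, laReturn, cutLoopB, sumLoopB]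
  · rw [hL] at hpre
    have hc := pre_head c r hpre
    have hok := pre_okRun r c hpre
    have hcut : cutLoopB (c :: r) 1 = 1 + pcut c r := by
      have := cutLoopB_eq (c :: r) ((c :: r).length - 1) 1 rfl (by omega) (by simp)
      simpa using this
    have hval : ∀ d ∈ c :: List.take (pcut c r) r, d ∈ (['^', 'v', '<', '>'] : List Char) := by
      intro d hd
      rcases List.mem_cons.mp hd with rfl | hd'
      · exact hc
      · exact okRun_take_valid r c hok d hd'
    rw [laLoop]
    simp only [Option.bind_some, beweeg_valid 0 0 c hc]
    rw [laLoop_eq r c _ _ _ hok, hcut]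
    simp only [Nat.add_comm 1 (pcut c r), List.take_succ_cons]
    rw [sumLoopB_eq _ 0 0 hval]
    simp only [List.map_cons, List.sum_cons, Prod.mk.injEq]
    push_cast
    refine ⟨by ring, by ring, by ring⟩
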